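-- pv_equiv track=rewrite | github.com/harshaccent/kurry | mslib/py/use.py | grouplist
-- ===== SOURCE A (Python) =====
-- def grouplist(arr, gap=1):
-- 	outp = [];
-- 	for i in arr:
-- 		if (outp == [] or (outp[-1][0] + outp[-1][1]*gap != i)):
-- 			outp.append([i, 1]);
-- 		else:
-- 			outp[-1][1]+=1;
-- 	return outp;
-- ===== SOURCE B (Python) =====
-- def grouplist(arr, gap=1):
-- 	# build the run list back-to-front: scan reversed, merging each element into
-- 	# the most recently started run (the run of the following elements) when that
-- 	# run starts at x + gap; runs are collected in reverse and flipped at the end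
-- 	rev = []
-- 	for x in reversed(arr):
-- 		if rev and rev[-1][0] == x + gap:
-- 			rev[-1] = [x, rev[-1][1] + 1]
-- 		else:
-- 			rev.append([x, 1])
-- 	rev.reverse()
-- 	return rev
-- ===== Notes on version B (the rewrite author's own statement) =====
-- stated objective: alternative
-- what changed: B builds the run list back-to-front: it scans the array in reverse, merging each element into the most recently started run when that run starts at x + gap (else starting a fresh [x, 1] run), collecting runs in reverse order and flipping once at the end, replacing A's forward scan with an expected-next-value accumulator.
import Mathlib
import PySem

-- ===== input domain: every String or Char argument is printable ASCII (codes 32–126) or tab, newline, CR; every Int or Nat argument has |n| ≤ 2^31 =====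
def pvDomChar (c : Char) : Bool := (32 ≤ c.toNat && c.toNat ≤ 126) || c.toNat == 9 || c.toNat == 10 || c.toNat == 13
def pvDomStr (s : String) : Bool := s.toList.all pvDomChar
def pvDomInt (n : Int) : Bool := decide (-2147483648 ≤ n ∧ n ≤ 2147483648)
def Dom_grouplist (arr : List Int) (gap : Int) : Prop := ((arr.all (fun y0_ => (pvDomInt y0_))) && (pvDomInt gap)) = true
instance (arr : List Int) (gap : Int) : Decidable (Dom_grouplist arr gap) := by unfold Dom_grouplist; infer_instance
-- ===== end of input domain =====

-- B builds the run list back-to-front (reversed scan comparing each element with the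
-- start of the following run) instead of A's forward scan with an expected-next-value
-- accumulator; objective: alternative (not claimed faster).

-- ===== PORT A =====
-- loop body of A: append a fresh run [i,1], or bump the count of the last run
def stepA (gap : Int) (outp : List (List Int)) (i : Int) : List (List Int) :=
  if outp = [] ∨ (outp.getLast?.getD []).getD 0 0 + (outp.getLast?.getD []).getD 1 0 * gap ≠ i
  then outp ++ [[i, 1]]
  else outp.dropLast ++ [[(outp.getLast?.getD []).getD 0 0, (outp.getLast?.getD []).getD 1 0 + 1]]

def grouplist (arr : List Int) (gap : Int) : List (List Int) :=
  arr.foldl (stepA gap) []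

-- ===== PORT B =====
-- loop body of B (element x, reversed run list rev of the elements after x):
-- merge x into rev[-1] when that run starts at x + gap, else append a fresh run [x,1]
def stepB' (gap : Int) (rev : List (List Int)) (x : Int) : List (List Int) :=
  if rev ≠ [] ∧ (rev.getLast?.getD []).getD 0 0 = x + gap
  then rev.dropLast ++ [[x, (rev.getLast?.getD []).getD 1 0 + 1]]
  else rev ++ [[x, 1]]

def grouplist_alt (arr : List Int) (gap : Int) : List (List Int) :=
  (arr.reverse.foldl (stepB' gap) []).reverse

-- ===== PRECONDITION & SPEC =====
def Spec_grouplist (arr : List Int) (gap : Int) (out : List (List Int)) : Prop := out = grouplist_alt arr gap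
instance (arr : List Int) (gap : Int) (out : List (List Int)) : Decidable (Spec_grouplist arr gap out) := by unfold Spec_grouplist; infer_instance

-- ===== CLAIM (what is proved, stated in full; the proofs are below) =====
def Claim_equal_grouplist : Prop := ∀ (arr : List Int) (gap : Int), Dom_grouplist arr gap → Spec_grouplist arr gap (grouplist arr gap)

-- ===== LEMMAS AND PROOFS =====

-- proof-side view of B's loop body, acting on the (un-reversed) result list
def stepB (gap : Int) (x : Int) (outp : List (List Int)) : List (List Int) :=
  if outp ≠ [] ∧ (outp.headD []).getD 0 0 = x + gap
  then [x, (outp.headD []).getD 1 0 + 1] :: outp.tail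
  else [x, 1] :: outp

theorem stepB'_eq (gap x : Int) (rev : List (List Int)) :
    stepB' gap rev x = (stepB gap x rev.reverse).reverse := by
  induction rev using List.reverseRecOn with
  | nil => simp [stepB', stepB]
  | append_singleton ys y _ =>
    unfold stepB' stepB
    by_cases h : (y.getD 0 0 : Int) = x + gap
    · rw [if_pos (by simp [List.getD] at h ⊢; exact h), if_pos (by simp [List.getD] at h ⊢; exact h)]
      simp
    · rw [if_neg (by simp [List.getD] at h ⊢; exact h), if_neg (by simp [List.getD] at h ⊢; exact h)]
      simp

theorem alt_eq_foldr (arr : List Int) (gap : Int) :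
    grouplist_alt arr gap = arr.foldr (stepB gap) [] := by
  unfold grouplist_alt
  rw [List.foldl_reverse]
  have : ∀ l : List Int,
      (l.foldr (fun x rev => stepB' gap rev x) []) = (l.foldr (stepB gap) []).reverse := by
    intro l
    induction l with
    | nil => rfl
    | cons a l ih => rw [List.foldr_cons, List.foldr_cons, stepB'_eq, ih, List.reverse_reverse]
  rw [this, List.reverse_reverse]

-- canonical run-recursion that A's fold computes
def runA (gap v c : Int) : List Int → List (List Int)
  | [] => [[v, c]]
  | i :: r => if v + c * gap = i then runA gap v (c + 1) r else [v, c] :: runA gap i 1 r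

theorem stepA_ne_nil (gap : Int) (s : List (List Int)) (i : Int) : stepA gap s i ≠ [] := by
  unfold stepA; split <;> simp

theorem stepA_append (gap i : Int) (pre s : List (List Int)) (hs : s ≠ []) :
    stepA gap (pre ++ s) i = pre ++ stepA gap s i := by
  unfold stepA
  rw [List.getLast?_append_of_ne_nil _ hs]
  have hd : (pre ++ s).dropLast = pre ++ s.dropLast := by
    cases s with
    | nil => exact absurd rfl hs
    | cons a t => simp
  rw [hd]
  have hps : pre ++ s ≠ [] := by simp [hs]
  by_cases h : (s.getLast?.getD []).getD 0 0 + (s.getLast?.getD []).getD 1 0 * gap ≠ i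
  · rw [if_pos (Or.inr h), if_pos (Or.inr h), List.append_assoc]
  · rw [if_neg (fun hc => hc.elim hps h), if_neg (fun hc => hc.elim hs h), List.append_assoc]

theorem foldl_stepA_append (gap : Int) (xs : List Int) :
    ∀ (pre s : List (List Int)), s ≠ [] →
      List.foldl (stepA gap) (pre ++ s) xs = pre ++ List.foldl (stepA gap) s xs := by
  induction xs with
  | nil => intro pre s _; simp
  | cons i r ih =>
    intro pre s hs
    simp only [List.foldl_cons]
    rw [stepA_append gap i pre s hs, ih pre _ (stepA_ne_nil gap s i)]

theorem foldl_stepA_single (gap : Int) (xs : List Int) :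
    ∀ v c : Int, List.foldl (stepA gap) [[v, c]] xs = runA gap v c xs := by
  induction xs with
  | nil => intro v c; simp [runA]
  | cons i r ih =>
    intro v c
    simp only [List.foldl_cons]
    by_cases h : v + c * gap = i
    · have hstep : stepA gap [[v, c]] i = [[v, c + 1]] := by
        unfold stepA
        rw [if_neg (by simp [h])]
        simp
      rw [hstep, ih, runA, if_pos h]
    · have hstep : stepA gap [[v, c]] i = [[v, c]] ++ [[i, 1]] := by
        unfold stepA
        rw [if_pos (Or.inr (by simpa using h))]
      rw [hstep, foldl_stepA_append gap r [[v, c]] [[i, 1]] (by simp), ih, runA, if_neg h]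
      simp

theorem grouplist_cons (gap x : Int) (xs : List Int) :
    grouplist (x :: xs) gap = runA gap x 1 xs := by
  show List.foldl (stepA gap) (stepA gap [] x) xs = runA gap x 1 xs
  have h0 : stepA gap [] x = [[x, 1]] := by unfold stepA; rw [if_pos (Or.inl rfl)]; simp
  rw [h0, foldl_stepA_single]

-- the result of runA depends on (v, c) only through v, the expected-next value
-- v + c*gap, and an additive count offset
theorem runA_shift (gap : Int) :
    ∀ (xs : List Int) (v c : Int), ∃ (m : Int) (t : List (List Int)),
      runA gap v c xs = [v, c + m] :: t ∧
      ∀ v' c' : Int, v' + c' * gap = v + c * gap → runA gap v' c' xs = [v', c' + m] :: t := by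
  intro xs
  induction xs with
  | nil =>
    intro v c
    exact ⟨0, [], by simp [runA], fun v' c' _ => by simp [runA]⟩
  | cons i r ih =>
    intro v c
    by_cases h : v + c * gap = i
    · obtain ⟨m, t, h1, h2⟩ := ih v (c + 1)
      refine ⟨m + 1, t, ?_, ?_⟩
      · rw [runA, if_pos h, h1]; ring_nf
      · intro v' c' he
        rw [runA, if_pos (by omega), h2 v' (c' + 1) (by ring_nf; ring_nf at he; omega)]
        ring_nf
    · refine ⟨0, runA gap i 1 r, by simp [runA, if_neg h], ?_⟩
      intro v' c' he
      rw [runA, if_neg (by omega)]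
      simp

theorem runA_stepB_nil (gap x : Int) : runA gap x 1 [] = stepB gap x [] := by
  simp [runA, stepB]

theorem runA_stepB_cons (gap x i : Int) (r : List Int) :
    runA gap x 1 (i :: r) = stepB gap x (runA gap i 1 r) := by
  obtain ⟨m, t, h1, h2⟩ := runA_shift gap r i 1
  rw [h1]
  by_cases h : x + gap = i
  · have h3 := h2 x (1 + 1) (by linarith)
    rw [runA, if_pos (by omega), h3]
    unfold stepB
    rw [if_pos (by simp [h.symm])]
    simp only [List.headD_cons, List.tail_cons]
    have : 1 + 1 + m = 1 + m + 1 := by ring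
    rw [this]
    simp
  · rw [runA, if_neg (by omega)]
    unfold stepB
    rw [if_neg (by simp; omega)]
    rw [← h1]

theorem grouplist_eq_alt (arr : List Int) (gap : Int) : grouplist arr gap = grouplist_alt arr gap := by
  induction arr with
  | nil => rfl
  | cons x xs ih =>
    have hb : grouplist_alt (x :: xs) gap = stepB gap x (grouplist_alt xs gap) := by
      rw [alt_eq_foldr, alt_eq_foldr, List.foldr_cons]
    rw [hb, ← ih, grouplist_cons]
    cases xs with
    | nil => exact runA_stepB_nil gap x
    | cons i r => rw [runA_stepB_cons, grouplist_cons]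

-- ===== VERDICT (by name: the statement is the Claim_ definition above) =====
theorem grouplist_spec : Claim_equal_grouplist := by
  intro arr gap _
  unfold Spec_grouplist
  exact grouplist_eq_alt arr gap
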